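-- pv_equiv track=rewrite | github.com/Grzesiek1212/Programing-Matura-Exam | ZadaniaZbiór/Zadanie 59/CiekaweLiczby.py | liczenieMocy
-- ===== SOURCE A (Python) =====
-- def liczenieMocy(x):
--     k = 0
--     p = x
--
--     while len(p) > 1:
--         n = 1
--         for j in range(len(p)):
--             n *= int(p[j])
--         p = str(n)
--         k += 1
--
--     return k
-- ===== SOURCE B (Python) =====
-- def liczenieMocy(x):
--     # recursive persistence: base case for <=1 chars, else 1 + persistence of the digit product
--     if len(x) <= 1:
--         return 0
--     n = 1
--     for c in x:
--         n *= int(c)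
--     return 1 + liczenieMocy(str(n))
-- ===== Notes on version B (the rewrite author's own statement) =====
-- stated objective: simpler
-- what changed: Replaced the while-loop with counter accumulator and index-based inner for over range(len(p)) by a direct recursive definition of persistence (base case len<=1, else 1 + recursion on str of the digit product computed by iterating over the characters themselves).
import Mathlib
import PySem

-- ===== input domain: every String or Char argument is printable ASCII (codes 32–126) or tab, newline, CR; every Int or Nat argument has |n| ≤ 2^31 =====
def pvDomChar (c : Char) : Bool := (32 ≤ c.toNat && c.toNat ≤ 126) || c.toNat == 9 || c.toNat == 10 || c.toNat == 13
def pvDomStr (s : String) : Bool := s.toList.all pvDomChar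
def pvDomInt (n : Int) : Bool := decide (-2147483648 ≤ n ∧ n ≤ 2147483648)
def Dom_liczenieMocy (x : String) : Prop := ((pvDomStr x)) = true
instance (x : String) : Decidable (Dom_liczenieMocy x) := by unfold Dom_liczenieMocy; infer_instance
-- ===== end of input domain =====

-- B rewrites the while-loop with a step counter as a direct recursion (1 + persistence of the
-- digit-product string), iterating over the characters instead of indices; same cost, simpler shape.
-- Both ports are totalized with the same (amply sufficient) fuel; int(c) on a non-digit raises in
-- Python, excluded by Pre_.

-- shared totalization fuel: numeric value of the digit string plus its length (strictly more than
-- the number of iterations the Python loop performs on any input Pre_ admits)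
def pvDigitNat (c : Char) : Nat := ((PySem.Int.ofChars? [c]).getD 0).toNat
def pvFuel (x : String) : Nat := x.toList.foldl (fun a c => 10 * a + pvDigitNat c) 0 + x.toList.length

-- ===== PORT A =====
-- while len(p) > 1: n = 1; for j in range(len(p)): n *= int(p[j]); p = str(n); k += 1
def pvLoopA : Nat → String → Int → Int
  | 0, _, k => k
  | f + 1, p, k =>
    if 1 < PySem.Str.len p then
      let n : Int := (PySem.List.pyRange 0 (PySem.Str.len p) 1).foldl
        (fun n j => n * ((PySem.Str.pyGet? p j).bind (fun c => PySem.Int.ofChars? [c])).getD 0) 1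
      pvLoopA f (PySem.Int.toStr n) (k + 1)
    else k

def liczenieMocy (x : String) : Int := pvLoopA (pvFuel x) x 0

-- ===== PORT B =====
def pvPersist : Nat → String → Int
  | 0, _ => 0
  | f + 1, p =>
    if PySem.Str.len p ≤ 1 then 0
    else
      1 + pvPersist f (PySem.Int.toStr
        (p.toList.foldl (fun n c => n * (PySem.Int.ofChars? [c]).getD 0) 1))

def liczenieMocy_alt (x : String) : Int := pvPersist (pvFuel x) x

-- ===== PRECONDITION & SPEC =====
-- Pre_ excludes exactly the inputs where Python A raises ValueError: length > 1 with a non-digit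
-- character (int(p[j]) fails there); B raises on the same inputs.
def Pre_liczenieMocy (x : String) : Prop :=
  x.toList.length ≤ 1 ∨ x.toList.all PySem.Chars.isdigit = true
instance (x : String) : Decidable (Pre_liczenieMocy x) := by unfold Pre_liczenieMocy; infer_instance
def pvWitness_liczenieMocy : String := "2739"

def Spec_liczenieMocy (x : String) (out : Int) : Prop := out = liczenieMocy_alt x
instance (x : String) (out : Int) : Decidable (Spec_liczenieMocy x out) := by unfold Spec_liczenieMocy; infer_instance

-- ===== CLAIM (what is proved, stated in full; the proofs are below) =====
def Claim_equal_liczenieMocy : Prop := ∀ (x : String), Dom_liczenieMocy x → Pre_liczenieMocy x → Spec_liczenieMocy x (liczenieMocy x)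

-- ===== LEMMAS AND PROOFS =====

-- A's indexed product over range(len(p)) equals B's product over the characters
theorem pvProd_eq (p : String) :
    (PySem.List.pyRange 0 (PySem.Str.len p) 1).foldl
      (fun n j => n * ((PySem.Str.pyGet? p j).bind (fun c => PySem.Int.ofChars? [c])).getD 0) 1
    = p.toList.foldl (fun n c => n * (PySem.Int.ofChars? [c]).getD 0) 1 := by
  have hfun : (fun (n : Int) (j : Int) =>
        n * ((PySem.Str.pyGet? p j).bind (fun c => PySem.Int.ofChars? [c])).getD 0)
      = fun (n : Int) (j : Int) =>
        (fun (n : Int) (c : Char) => n * (PySem.Int.ofChars? [c]).getD 0) n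
          (PySem.List.pyGetD p.toList j 'a') := by
    funext n j
    simp only [PySem.Str.pyGet?_eq, PySem.Chars.pyGet?_eq_listPyGet?, PySem.List.pyGetD]
    cases h : PySem.List.pyGet? p.toList j with
    | none =>
      have h0 : (PySem.Int.ofChars? ['a'] : Option Int).getD 0 = 0 := by decide
      simp [h0]
    | some c => simp
  rw [show PySem.Str.len p = ((p.toList.length : Int)) by
        simp [PySem.Str.len_eq]]
  rw [hfun]
  exact PySem.List.foldl_pyRange_zero_pyGetD' p.toList 'a'
    (fun (n : Int) (c : Char) => n * (PySem.Int.ofChars? [c]).getD 0) 1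

theorem pvLoop_eq (f : Nat) : ∀ (p : String) (k : Int), pvLoopA f p k = k + pvPersist f p := by
  induction f with
  | zero => intro p k; simp [pvLoopA, pvPersist]
  | succ f ih =>
    intro p k
    simp only [pvLoopA, pvPersist]
    by_cases h : 1 < PySem.Str.len p
    · rw [if_pos h, if_neg (by omega), pvProd_eq, ih]
      omega
    · rw [if_neg h, if_pos (by omega)]
      omega

-- ===== VERDICT (by name: the statement is the Claim_ definition above) =====
theorem liczenieMocy_spec : Claim_equal_liczenieMocy := by
  intro x _ _
  unfold Spec_liczenieMocy liczenieMocy liczenieMocy_alt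
  rw [pvLoop_eq]
  omega
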